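/- GENERATED by farm/mkstatement.py from design/units.tsv (unit `start_decoder.R16d`) and the assertions of Vorbis/Spec/StartDecoderR16.lean — do not edit.
   THE STATEMENT of the proof unit `start_decoder.R16d`: segment R16d of `start_decoder` (29 instructions; entries 0x1166f6;
   exits 0x11677b,0x113b22; ranges 0x1166f6-0x116776)
   takes each of its entry assertions to one of its exit assertions (`Vorbis.Spec.StartDecoder.SegR16d`), given the contracts of its callees.
   What the names mean: Vorbis/Spec/Basic.lean (the shared hypotheses), Vorbis/Spec/StartDecoderR16.lean (the assertions). The theorem to prove:
   `theorem start_decoder_R16d_ok : Vorbis.Spec.start_decoder_R16d.Statement`. -/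
import Vorbis.Spec.Leaves
import Vorbis.Spec.Libc
import Vorbis.Spec.StartDecoderR16
namespace Vorbis.Spec.start_decoder_R16d
open X86 X86.User Asan

/-- The statement of unit `start_decoder.R16d`. -/
def Statement : Prop :=
  ∀ (Lay : Layout) (_hLay : Lay.hi = 0x1000000) (μ : Microarch) (_hμ : UserX.MicroOK μ) (u₀ : State)
    (_hcode : HasCodeNat Lay u₀ Vorbis.L.start_decoder.entry Vorbis.Code.code_start_decoder.nat Vorbis.L.start_decoder.size)
    (_h_asan_load4_noabort : Asan.SmallCheck Lay μ Vorbis.WayInv (Vorbis.CodeOK u₀) [.rax, .rcx, .rdx] 4 Vorbis.L.__asan_load4_noabort.entry)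
    (_h_asan_store8_noabort : Asan.SmallCheck Lay μ Vorbis.WayInv (Vorbis.CodeOK u₀) [.rax, .rcx, .rdx] 8 Vorbis.L.__asan_store8_noabort.entry)
    (_h_asan_load8_noabort : Asan.SmallCheck Lay μ Vorbis.WayInv (Vorbis.CodeOK u₀) [.rax, .rcx, .rdx] 8 Vorbis.L.__asan_load8_noabort.entry)
    (_h_error : ∀ (others : List Obj) (frames : List (Nat × FrameLayout)), Calls Lay μ Vorbis.WayInv (Vorbis.conv u₀) Vorbis.L.error.entry (Vorbis.Spec.error.spec others frames))
    (_h_memset : ∀ (others : List Obj) (frames : List (Nat × FrameLayout)), Calls Lay μ Vorbis.WayInv (Vorbis.conv u₀) Vorbis.L.memset.entry (Vorbis.Spec.memset.spec others frames)),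
    Vorbis.Spec.StartDecoder.SegR16d Lay μ u₀

end Vorbis.Spec.start_decoder_R16d
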